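-- pv_equiv track=rewrite | github.com/KayloPortal/CodeForcesRepo | problemset/Problem-1373-B_Game/Game.py | func
-- ===== SOURCE A (Python) =====
-- def func(string):
--   isAliceTurn = True
--   while(len(string) > 1):
--     for i in range(len(string) - 1):
--       if string[i] != string[i+1]:
--         isAliceTurn = not isAliceTurn
--         if len(string) == 2:
--           string = ""
--           break
--         string = string[0:i] + string[i+2:]
--         break
--     else:
--       break
--
--   if isAliceTurn:
--     return "NET"
--   else:
--     return "DA"
-- ===== SOURCE B (Python) =====
-- def func(string):
--     cur = ''
--     cnt = 0
--     moves = 0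
--     for c in string:
--         if cnt == 0:
--             cur = c
--             cnt = 1
--         elif c == cur:
--             cnt += 1
--         else:
--             cnt -= 1
--             moves += 1
--     return "DA" if moves % 2 == 1 else "NET"
-- ===== Notes on version B (the rewrite author's own statement) =====
-- stated objective: faster
-- what changed: Replaced the quadratic restart-scan simulation (repeatedly rebuilding the string after deleting the first adjacent differing pair) by a single left-to-right pass maintaining a homogeneous-stack counter (char, count) and a move counter, returning the parity of the moves.
import Mathlib
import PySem

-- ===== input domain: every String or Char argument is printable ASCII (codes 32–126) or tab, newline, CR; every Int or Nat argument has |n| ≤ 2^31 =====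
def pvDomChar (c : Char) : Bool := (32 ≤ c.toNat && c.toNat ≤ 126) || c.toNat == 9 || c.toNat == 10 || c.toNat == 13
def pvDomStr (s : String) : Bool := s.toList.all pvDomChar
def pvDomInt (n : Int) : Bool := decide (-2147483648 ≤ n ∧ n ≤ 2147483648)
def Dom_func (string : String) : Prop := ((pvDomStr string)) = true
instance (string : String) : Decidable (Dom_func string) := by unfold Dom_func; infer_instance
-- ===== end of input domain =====

-- B replaces A's quadratic simulation of repeatedly deleting the first adjacent differing
-- pair by a single-pass counter (stack of identical chars) computing the same move parity; objective: faster.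

-- ===== PORT A =====

-- the inner `for i in range(len(string)-1)` loop: index of the first adjacent differing pair
def findD : List Char → Option Nat
  | [] => none
  | [_] => none
  | a :: b :: t => if a ≠ b then some 0 else (findD (b :: t)).map (· + 1)

-- needed for loopA's termination
theorem findD_bound : ∀ (l : List Char) (i : Nat), findD l = some i → i + 2 ≤ l.length := by
  intro l
  induction l with
  | nil => intro i h; simp [findD] at h
  | cons a t ih =>
    intro i h
    cases t with
    | nil => simp [findD] at h
    | cons b t' =>
      simp only [findD] at h
      split at h
      · cases h; simp
      · rcases Option.map_eq_some_iff.mp h with ⟨j, hj, rfl⟩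
        have := ih j hj
        simp at this ⊢
        omega

-- the outer `while len(string) > 1` loop, carrying isAliceTurn; slices s[0:i]+s[i+2:]
-- (i ≥ 0, in range) are exactly take/drop
def loopA (s : List Char) (alice : Bool) : Bool :=
  if s.length > 1 then
    match h : findD s with
    | none => alice
    | some i =>
      if s.length = 2 then !alice
      else loopA (s.take i ++ s.drop (i + 2)) (!alice)
  else alice
termination_by s.length
decreasing_by
  have := findD_bound s i h
  simp only [List.length_append, List.length_take, List.length_drop]
  omega

def func (string : String) : String :=
  if loopA string.toList true then "NET" else "DA"

-- ===== PORT B =====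

-- state (cur, cnt, moves): homogeneous stack of `cnt` copies of `cur`, moves counted
def stepB (st : Char × Nat × Nat) (c : Char) : Char × Nat × Nat :=
  match st with
  | (cur, cnt, m) =>
    if cnt = 0 then (c, 1, m)
    else if c = cur then (cur, cnt + 1, m)
    else (cur, cnt - 1, m + 1)

def func_alt (string : String) : String :=
  if (string.toList.foldl stepB (' ', 0, 0)).2.2 % 2 = 1 then "DA" else "NET"

-- ===== PRECONDITION & SPEC =====
def Spec_func (string : String) (out : String) : Prop := out = func_alt string
instance (string : String) (out : String) : Decidable (Spec_func string out) := by unfold Spec_func; infer_instance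

-- ===== CLAIM (what is proved, stated in full; the proofs are below) =====
def Claim_equal_func : Prop := ∀ (string : String), Dom_func string → Spec_func string (func string)

-- ===== LEMMAS AND PROOFS =====

def mv (l : List Char) : Nat := (l.foldl stepB (' ', 0, 0)).2.2

-- the move counter is an additive accumulator
theorem mv_shift : ∀ (l : List Char) (c : Char) (n m : Nat),
    (l.foldl stepB (c, n, m)).2.2 = m + (l.foldl stepB (c, n, 0)).2.2 := by
  intro l
  induction l with
  | nil => intro c n m; simp
  | cons x t ih =>
    intro c n m
    simp only [List.foldl_cons, stepB]
    split
    · rw [ih x 1 m]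
    · split
      · rw [ih c (n+1) m]
      · rw [ih c (n-1) (m+1), ih c (n-1) 1]; omega

-- with an empty stack the remembered character is irrelevant
theorem mv_fresh : ∀ (l : List Char) (c c' : Char) (m : Nat),
    (l.foldl stepB (c, 0, m)).2.2 = (l.foldl stepB (c', 0, m)).2.2 := by
  intro l c c' m
  cases l with
  | nil => rfl
  | cons x t => simp [stepB]

theorem foldl_rep : ∀ (k : Nat) (a : Char) (n m : Nat) (r : List Char), n ≠ 0 →
    List.foldl stepB (a, n, m) (List.replicate k a ++ r) = List.foldl stepB (a, n + k, m) r := by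
  intro k
  induction k with
  | zero => intro a n m r _; simp
  | succ k ih =>
    intro a n m r hn
    rw [List.replicate_succ, List.cons_append, List.foldl_cons]
    simp only [stepB, if_neg hn, if_true]
    rw [ih a (n+1) m r (by omega)]
    have : n + 1 + k = n + (k + 1) := by omega
    rw [this]

theorem mv_startRep : ∀ (i : Nat) (a : Char) (r : List Char),
    (List.foldl stepB (' ', 0, 0) (List.replicate i a ++ r)).2.2
      = (List.foldl stepB (a, i, 0) r).2.2 := by
  intro i a r
  cases i with
  | zero => simpa using mv_fresh r ' ' a 0
  | succ j =>
    rw [List.replicate_succ, List.cons_append, List.foldl_cons]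
    simp only [stepB, if_true]
    rw [foldl_rep j a 1 0 r (by omega)]
    have : 1 + j = j + 1 := by omega
    rw [this]

theorem mv_some (i : Nat) (a y : Char) (r : List Char) (hy : y ≠ a) :
    mv (List.replicate (i+1) a ++ y :: r) = 1 + mv (List.replicate i a ++ r) := by
  unfold mv
  rw [mv_startRep (i+1) a (y :: r), List.foldl_cons]
  simp only [stepB, if_neg (Nat.succ_ne_zero i), if_neg hy]
  rw [mv_shift r a (i + 1 - 1) 1, mv_startRep i a r]
  simp

theorem mv_rep (k : Nat) (a : Char) : mv (List.replicate k a) = 0 := by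
  unfold mv
  have := mv_startRep k a []
  simpa using this

theorem findD_none_rep : ∀ (l : List Char), findD l = none → ∃ a, l = List.replicate l.length a := by
  intro l
  induction l with
  | nil => intro _; exact ⟨' ', rfl⟩
  | cons x t ih =>
    intro h
    cases t with
    | nil => exact ⟨x, rfl⟩
    | cons b t' =>
      simp only [findD] at h
      split at h
      · simp at h
      · rename_i hxb
        rcases ih (by simpa using h) with ⟨a, ha⟩
        have hb : b = a := by
          have := ha
          rw [List.length_cons, List.replicate_succ] at this
          exact (List.cons.injEq _ _ _ _).mp this |>.1
        refine ⟨a, ?_⟩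
        have hx : x = a := by
          have : x = b := by by_contra hc; exact hxb hc
          rw [this, hb]
        rw [List.length_cons, List.replicate_succ, hx]
        conv_lhs => rw [ha]

theorem findD_some_rep : ∀ (l : List Char) (i : Nat), findD l = some i →
    ∃ a y r, l = List.replicate (i+1) a ++ y :: r ∧ y ≠ a := by
  intro l
  induction l with
  | nil => intro i h; simp [findD] at h
  | cons x t ih =>
    intro i h
    cases t with
    | nil => simp [findD] at h
    | cons b t' =>
      simp only [findD] at h
      split at h
      · rename_i hxb
        cases h
        exact ⟨x, b, t', by simp, fun hc => hxb hc.symm⟩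
      · rename_i hxb
        have hxbeq : x = b := by by_contra hc; exact hxb hc
        rcases Option.map_eq_some_iff.mp h with ⟨j, hj, rfl⟩
        rcases ih j hj with ⟨a, y, r, hrep, hy⟩
        have hb : b = a := by
          have := hrep
          rw [List.replicate_succ, List.cons_append] at this
          exact (List.cons.injEq _ _ _ _).mp this |>.1
        refine ⟨a, y, r, ?_, hy⟩
        rw [List.replicate_succ, List.cons_append, ← hrep, hxbeq, hb]

theorem loopA_parity : ∀ (n : Nat) (l : List Char) (a : Bool), l.length ≤ n →
    loopA l a = xor a (decide (mv l % 2 = 1)) := by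
  intro n
  induction n with
  | zero =>
    intro l a h
    have : l = [] := List.eq_nil_of_length_eq_zero (by omega)
    subst this
    rw [loopA]
    simp [mv]
  | succ n ih =>
    intro l a h
    by_cases hl : l.length > 1
    · rw [loopA, if_pos hl]
      split
      next hF =>
        rcases findD_none_rep l hF with ⟨c, hc⟩
        rw [hc, mv_rep]
        simp
      next i hF =>
        rcases findD_some_rep l i hF with ⟨c, y, r, hrep, hy⟩
        have hmv : mv l = 1 + mv (List.replicate i c ++ r) := by
          rw [hrep]; exact mv_some i c y r hy
        have htake : l.take i = List.replicate i c := by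
          rw [hrep, List.replicate_succ', List.append_assoc,
            List.take_append_of_le_length (by simp)]
          simp
        have hdrop : l.drop (i + 2) = r := by
          rw [hrep]
          have h2 : i + 2 = (List.replicate (i+1) c).length + 1 := by simp
          rw [h2, ← List.drop_drop, List.drop_append_of_le_length (by omega)]
          simp
        by_cases h2 : l.length = 2
        · rw [if_pos h2]
          -- length 2 forces i = 0 and r = []
          have hlen : (i + 1) + (1 + r.length) = 2 := by
            have := congrArg List.length hrep
            simp at this
            omega
          have hi : i = 0 := by omega
          have hr : r = [] := List.eq_nil_of_length_eq_zero (by omega)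
          subst hi; subst hr
          rw [hmv]
          simp [mv]
        · rw [if_neg h2]
          have hlen' : (l.take i ++ l.drop (i + 2)).length ≤ n := by
            have := findD_bound l i hF
            simp only [List.length_append, List.length_take, List.length_drop]
            omega
          rw [ih _ (!a) hlen', htake, hdrop]
          have hpar : (mv l % 2 = 1) ↔ ¬ (mv (List.replicate i c ++ r) % 2 = 1) := by
            omega
          cases a <;> by_cases hp : mv (List.replicate i c ++ r) % 2 = 1 <;>
            simp_all
    · rw [loopA, if_neg hl]
      have : l = [] ∨ ∃ c, l = [c] := by
        cases l with
        | nil => exact Or.inl rfl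
        | cons x t =>
          cases t with
          | nil => exact Or.inr ⟨x, rfl⟩
          | cons y t' => simp at hl
      rcases this with rfl | ⟨c, rfl⟩ <;> simp [mv, stepB]

-- ===== VERDICT (by name: the statement is the Claim_ definition above) =====
theorem func_spec : Claim_equal_func := by
  intro s _
  unfold Spec_func func func_alt
  rw [loopA_parity s.toList.length s.toList true (le_refl _)]
  by_cases h : mv s.toList % 2 = 1
  · simp [mv] at h ⊢
    simp [h]
  · simp [mv] at h ⊢
    simp [h]
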